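-- pv_equiv track=rewrite | github.com/stevieniu/leetcode | python/array/sliding_window/number_of_equal_count_substrings.py | equalCountSubstrings
-- ===== SOURCE A (Python) =====
-- from collections import Counter
--
-- def equalCountSubstrings(s: str, count: int) -> int:
--     # fixed window . window size must be mutiples of count, i.e. count x [1 ~ 26]
--     # try every window from size count to size 26 x count
--     # time complexity is O(N) * 26
--     cnt, n = 0, len(s)
--     for i in range(1, 27):
--         L = i * count
--         if L > n: break
--         l, d = 0, Counter()
--         for r, c in enumerate(s):
--             d[c] += 1
--             if r - l + 1 == L:
--                 if all(x == count or x == 0 for x in d.values()):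
--                     cnt += 1
--                 d[s[l]] -= 1
--                 l += 1
--
--     return cnt
-- ===== SOURCE B (Python) =====
-- def _bad1(v, count):
--     # 1 if a character with this multiplicity makes the window invalid, else 0
--     return 1 if (v != 0 and v != count) else 0
--
-- def equalCountSubstrings(s, count):
--     # Incremental sliding window: maintain `bad` = number of characters whose
--     # in-window multiplicity is neither 0 nor `count`; a window is valid iff bad == 0.
--     if count <= 0:
--         return 0
--     n = len(s)
--     total = 0
--     for L in range(count, min(n, 26 * count) + 1, count):
--         freq = {}
--         bad = 0
--         for r in range(n):
--             c = s[r]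
--             v = freq.get(c, 0) + 1
--             freq[c] = v
--             bad += _bad1(v, count) - _bad1(v - 1, count)
--             if r >= L - 1:
--                 if bad == 0:
--                     total += 1
--                 o = s[r - L + 1]
--                 w = freq[o] - 1
--                 freq[o] = w
--                 bad += _bad1(w, count) - _bad1(w + 1, count)
--     return total
-- ===== Notes on version B (the rewrite author's own statement) =====
-- stated objective: faster
-- what changed: A re-scans the whole Counter with all(x == count or x == 0 ...) for every window position; B maintains an incremental counter 'bad' of characters whose in-window multiplicity is neither 0 nor count, updated in O(1) per slide, so each window validity check is a single comparison bad == 0.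
import Mathlib
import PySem

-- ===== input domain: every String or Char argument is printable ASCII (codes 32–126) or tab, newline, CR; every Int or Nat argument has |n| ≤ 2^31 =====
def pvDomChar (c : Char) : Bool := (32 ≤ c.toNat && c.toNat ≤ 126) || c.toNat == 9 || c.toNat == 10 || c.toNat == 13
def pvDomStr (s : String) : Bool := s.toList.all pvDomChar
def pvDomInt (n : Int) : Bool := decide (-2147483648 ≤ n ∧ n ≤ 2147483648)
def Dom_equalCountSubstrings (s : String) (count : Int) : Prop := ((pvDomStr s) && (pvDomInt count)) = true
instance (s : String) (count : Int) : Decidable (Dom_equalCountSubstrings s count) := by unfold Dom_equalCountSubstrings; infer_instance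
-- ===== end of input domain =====

-- B replaces A's per-window all()-scan over the Counter by an incrementally maintained
-- count of invalid characters ('bad'), checked in O(1) per slide (measurably faster by a constant factor).

-- ===== PORT A =====
-- all(x == count or x == 0 for x in d.values())
def pvCharAll (d : PySem.Dict Char Int) (count : Int) : Bool :=
  d.values.all (fun x => x == count || x == 0)

-- inner 'for r, c in enumerate(s)' loop of A, state (l, d, cnt)
def pvAInner (L count : Int) (cs : List Char) :
    List (Int × Char) → Int × PySem.Dict Char Int × Int → Int × PySem.Dict Char Int × Int
  | [], st => st
  | (r, c) :: rest, (l, d, cnt) =>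
    let d1 := d.insert c (d.getD c 0 + 1)          -- d[c] += 1 (Counter default 0)
    if r - l + 1 = L then
      let cnt1 := if pvCharAll d1 count then cnt + 1 else cnt
      let ch := (PySem.List.pyGet? cs l).getD ' '  -- s[l]; l ≤ r < len(s) whenever reached
      let d2 := d1.insert ch (d1.getD ch 0 - 1)    -- d[s[l]] -= 1
      pvAInner L count cs rest (l + 1, d2, cnt1)
    else
      pvAInner L count cs rest (l, d1, cnt)

-- outer 'for i in range(1, 27)' loop with its break
def pvAOuter (count n : Int) (cs : List Char) : List Int → Int → Int
  | [], cnt => cnt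
  | i :: rest, cnt =>
    let L := i * count
    if L > n then cnt                               -- break
    else pvAOuter count n cs rest
      (pvAInner L count cs (PySem.List.enumerate cs 0) (0, PySem.Dict.empty, cnt)).2.2

def equalCountSubstrings (s : String) (count : Int) : Int :=
  pvAOuter count (PySem.Str.len s) s.toList (PySem.List.pyRange 1 27 1) 0

-- ===== PORT B =====
def pvBad1 (v count : Int) : Int := if v ≠ 0 ∧ v ≠ count then 1 else 0

-- inner 'for r in range(n)' loop of B, state (freq, bad, total)
def pvBInner (L count : Int) (cs : List Char) :
    List Int → PySem.Dict Char Int × Int × Int → PySem.Dict Char Int × Int × Int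
  | [], st => st
  | r :: rest, (freq, bad, total) =>
    let c := (PySem.List.pyGet? cs r).getD ' '     -- s[r]; r ∈ range(n), always in range
    let v := freq.getD c 0 + 1                      -- freq.get(c, 0) + 1
    let freq1 := freq.insert c v
    let bad1 := bad + (pvBad1 v count - pvBad1 (v - 1) count)
    if r ≥ L - 1 then
      let total1 := if bad1 = 0 then total + 1 else total
      let o := (PySem.List.pyGet? cs (r - L + 1)).getD ' '   -- s[r - L + 1]
      let w := freq1.getD o 0 - 1                   -- freq[o] - 1 (o is in the window, present)
      let freq2 := freq1.insert o w
      let bad2 := bad1 + (pvBad1 w count - pvBad1 (w + 1) count)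
      pvBInner L count cs rest (freq2, bad2, total1)
    else
      pvBInner L count cs rest (freq1, bad1, total)

def equalCountSubstrings_alt (s : String) (count : Int) : Int :=
  if count ≤ 0 then 0
  else
    (PySem.List.pyRange count (min (PySem.Str.len s) (26 * count) + 1) count).foldl
      (fun total L =>
        (pvBInner L count s.toList (PySem.List.pyRange 0 (PySem.Str.len s) 1)
          (PySem.Dict.empty, 0, total)).2.2) 0

-- ===== PRECONDITION & SPEC =====
def Spec_equalCountSubstrings (s : String) (count : Int) (out : Int) : Prop := out = equalCountSubstrings_alt s count
instance (s : String) (count : Int) (out : Int) : Decidable (Spec_equalCountSubstrings s count out) := by unfold Spec_equalCountSubstrings; infer_instance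

-- ===== CLAIM (what is proved, stated in full; the proofs are below) =====
def Claim_equal_equalCountSubstrings : Prop := ∀ (s : String) (count : Int), Dom_equalCountSubstrings s count → Spec_equalCountSubstrings s count (equalCountSubstrings s count)

-- ===== LEMMAS AND PROOFS =====

-- number of keys of d whose multiplicity is neither 0 nor count
def pvBadN (count : Int) (d : PySem.Dict Char Int) : Nat :=
  d.keys.countP (fun c => decide (d.getD c 0 ≠ 0 ∧ d.getD c 0 ≠ count))

lemma pvBadN_insert (count : Int) (d : PySem.Dict Char Int) (k : Char) (v : Int)
    (h : d.keys.Nodup) :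
    (pvBadN count (d.insert k v) : Int)
      = pvBadN count d + (pvBad1 v count - pvBad1 (d.getD k 0) count) := by
  unfold pvBadN pvBad1
  by_cases hk : d.contains k = true
  · have hmem : k ∈ d.keys := (PySem.Dict.contains_iff_mem_keys d k).mp hk
    rw [PySem.Dict.keys_insert_of_contains d v hk]
    have hperm := List.perm_cons_erase hmem
    rw [hperm.countP_eq, hperm.countP_eq]
    simp only [List.countP_cons]
    have herase : ∀ c ∈ d.keys.erase k,
        (decide ((d.insert k v).getD c 0 ≠ 0 ∧ (d.insert k v).getD c 0 ≠ count)) = true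
          ↔ (decide (d.getD c 0 ≠ 0 ∧ d.getD c 0 ≠ count)) = true := by
      intro c hcmem
      have hne : c ≠ k := ((h.mem_erase_iff).mp hcmem).1
      rw [PySem.Dict.getD_insert, if_neg hne]
    rw [List.countP_congr herase]
    rw [PySem.Dict.getD_insert, if_pos rfl]
    simp only [decide_eq_true_eq]
    push_cast
    split_ifs <;> omega
  · have hk' : d.contains k = false := by simpa using hk
    rw [PySem.Dict.keys_insert_of_not_contains d v hk', List.countP_append]
    have hkeys : ∀ c ∈ d.keys,
        (decide ((d.insert k v).getD c 0 ≠ 0 ∧ (d.insert k v).getD c 0 ≠ count)) = true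
          ↔ (decide (d.getD c 0 ≠ 0 ∧ d.getD c 0 ≠ count)) = true := by
      intro c hcmem
      have hne : c ≠ k := by
        intro hceq; subst hceq
        exact absurd ((PySem.Dict.contains_iff_mem_keys d c).mpr hcmem) (by simp [hk'])
      rw [PySem.Dict.getD_insert, if_neg hne]
    rw [List.countP_congr hkeys]
    rw [PySem.Dict.getD_of_not_contains d 0 hk']
    simp only [List.countP_cons, List.countP_nil]
    rw [PySem.Dict.getD_insert, if_pos rfl]
    simp only [decide_eq_true_eq]
    push_cast
    split_ifs <;> first | omega | tauto

lemma pvCharAll_iff (d : PySem.Dict Char Int) (count : Int) (h : d.keys.Nodup) :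
    pvCharAll d count = true ↔ pvBadN count d = 0 := by
  unfold pvCharAll pvBadN
  rw [PySem.Dict.values_eq_map_keys d h 0, List.all_eq_true, List.countP_eq_zero]
  constructor
  · intro hall c hc
    have := hall (d.getD c 0) (List.mem_map_of_mem hc)
    simp at this ⊢
    tauto
  · intro hz x hx
    obtain ⟨c, hc, rfl⟩ := List.mem_map.mp hx
    have := hz c hc
    simp at this ⊢
    tauto

lemma pvBadN_empty (count : Int) : pvBadN count PySem.Dict.empty = 0 := by
  simp [pvBadN, PySem.Dict.keys_empty]

lemma pyRange_pos_eq_nil (a b st : Int) (hst : 0 < st) (hba : b ≤ a) :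
    PySem.List.pyRange a b st = [] := by
  rw [PySem.List.pyRange_of_pos _ _ hst, if_neg (by omega)]
  simp

lemma pyRange_pos_cons (a b st : Int) (hst : 0 < st) (hab : a < b) :
    PySem.List.pyRange a b st = a :: PySem.List.pyRange (a + st) b st := by
  rw [PySem.List.pyRange_of_pos _ _ hst, PySem.List.pyRange_of_pos _ _ hst]
  by_cases h2 : a + st < b
  · rw [if_pos hab, if_pos h2]
    have hN : ((b - a + st - 1) / st).toNat = ((b - (a + st) + st - 1) / st).toNat + 1 := by
      have e1 : b - a + st - 1 = (b - (a + st) + st - 1) + 1 * st := by ring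
      rw [e1, Int.add_mul_ediv_right _ _ (by omega : st ≠ 0)]
      have h0 : 0 ≤ (b - (a + st) + st - 1) / st := Int.ediv_nonneg (by omega) (by omega)
      omega
    rw [hN, List.range_succ_eq_map]
    simp only [List.map_cons]
    congr 1
    · simp
    rw [List.map_map]
    apply List.map_congr_left
    intro k _
    simp [Function.comp]
    ring
  · rw [if_pos hab, if_neg h2]
    have hq : (b - a + st - 1) / st = 1 := by
      rw [← PySem.Int.floordiv_eq_ediv_of_pos hst, PySem.Int.floordiv_eq_iff_of_pos hst]
      constructor <;> omega
    rw [hq]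
    simp

lemma inner_sync (count L : Int) (cs : List Char) :
    ∀ (m k : Nat), cs.length ≤ k + m →
    ∀ (d : PySem.Dict Char Int) (bad cnt : Int),
      d.keys.Nodup →
      bad = (pvBadN count d : Int) →
      (pvAInner L count cs ((PySem.List.enumerate cs 0).drop k)
          (max 0 ((k : Int) - L + 1), d, cnt)).2.2
        = (pvBInner L count cs ((PySem.List.pyRange 0 (cs.length : Int) 1).drop k)
          (d, bad, cnt)).2.2 := by
  intro m
  induction m with
  | zero =>
    intro k hk d bad cnt _ _
    rw [List.drop_eq_nil_of_le (by rw [PySem.List.length_enumerate]; omega),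
        List.drop_eq_nil_of_le (by rw [PySem.List.length_pyRange_one]; omega)]
    simp [pvAInner, pvBInner]
  | succ m ih =>
    intro k hk d bad cnt hnd hbad
    by_cases hklen : cs.length ≤ k
    · rw [List.drop_eq_nil_of_le (by rw [PySem.List.length_enumerate]; omega),
          List.drop_eq_nil_of_le (by rw [PySem.List.length_pyRange_one]; omega)]
      simp [pvAInner, pvBInner]
    · have hklt : k < cs.length := by omega
      rw [List.drop_eq_getElem_cons (l := PySem.List.enumerate cs 0)
            (by rw [PySem.List.length_enumerate]; omega)]
      rw [List.drop_eq_getElem_cons (l := PySem.List.pyRange 0 (cs.length : Int) 1)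
            (by rw [PySem.List.length_pyRange_one]; omega)]
      rw [PySem.List.getElem_enumerate, PySem.List.getElem_pyRange_one]
      simp only [pvAInner, pvBInner]
      have hget : (PySem.List.pyGet? cs ((0 : Int) + (k : Nat))).getD ' ' = cs[k] := by
        rw [zero_add, PySem.List.pyGet?_natCast, List.getElem?_eq_getElem hklt]
        rfl
      rw [hget]
      set c := cs[k] with hc
      set v := d.getD c 0 + 1 with hv
      set d1 := d.insert c v with hd1
      have hnd1 : d1.keys.Nodup := PySem.Dict.nodup_keys_insert d c v hnd
      have hbad1 : bad + (pvBad1 v count - pvBad1 (v - 1) count) = (pvBadN count d1 : Int) := by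
        rw [hbad, hd1, pvBadN_insert count d c v hnd]
        have : d.getD c 0 = v - 1 := by omega
        rw [this]
      by_cases hbr : (0 : Int) + (k : Nat) ≥ L - 1
      · rw [if_pos (by omega : (0 : Int) + (k : Nat) - max 0 ((k : Nat) - L + 1) + 1 = L),
            if_pos hbr]
        have hml : max 0 ((k : Nat) - L + 1) = (0 : Int) + (k : Nat) - L + 1 := by omega
        rw [hml]
        set o := (PySem.List.pyGet? cs ((0 : Int) + (k : Nat) - L + 1)).getD ' ' with ho
        set w := d1.getD o 0 - 1 with hw
        set d2 := d1.insert o w with hd2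
        have hnd2 : d2.keys.Nodup := PySem.Dict.nodup_keys_insert d1 o w hnd1
        have hbad2 : bad + (pvBad1 v count - pvBad1 (v - 1) count)
            + (pvBad1 w count - pvBad1 (w + 1) count) = (pvBadN count d2 : Int) := by
          rw [hd2, pvBadN_insert count d1 o w hnd1, ← hbad1]
          have : d1.getD o 0 = w + 1 := by omega
          rw [this]
        have hcnt : (if pvCharAll d1 count then cnt + 1 else cnt)
            = (if bad + (pvBad1 v count - pvBad1 (v - 1) count) = 0 then cnt + 1 else cnt) := by
          by_cases hall : pvCharAll d1 count
          · rw [if_pos hall, if_pos (by rw [hbad1, (pvCharAll_iff d1 count hnd1).mp hall]; norm_num)]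
          · rw [if_neg hall, if_neg ?_]
            intro h0
            apply hall
            rw [pvCharAll_iff d1 count hnd1]
            rw [hbad1] at h0
            exact_mod_cast h0
        rw [hcnt]
        have hmaxs : (0 : Int) + (k : Nat) - L + 1 + 1 = max 0 (((k + 1 : Nat) : Int) - L + 1) := by
          push_cast; omega
        rw [hmaxs]
        exact ih (k + 1) (by omega) d2 _ _ hnd2 (by rw [← hbad2])
      · rw [if_neg (by omega : ¬ ((0 : Int) + (k : Nat) - max 0 ((k : Nat) - L + 1) + 1 = L)),
            if_neg hbr]
        have hmaxs : max 0 ((k : Nat) - L + 1) = max 0 (((k + 1 : Nat) : Int) - L + 1) := by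
          push_cast; omega
        rw [hmaxs]
        exact ih (k + 1) (by omega) d1 _ _ hnd1 hbad1

lemma pvAInner_nonpos (L count : Int) (cs : List Char) (hL : L ≤ 0) :
    ∀ es : List (Int × Char), (∀ p ∈ es, 0 ≤ p.1) →
    ∀ (d : PySem.Dict Char Int) (cnt : Int),
      (pvAInner L count cs es (0, d, cnt)).2.2 = cnt := by
  intro es
  induction es with
  | nil => intro _ d cnt; simp [pvAInner]
  | cons p rest ih =>
    intro hpos d cnt
    obtain ⟨r, c⟩ := p
    have hr : 0 ≤ r := hpos (r, c) (List.mem_cons_self)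
    simp only [pvAInner]
    rw [if_neg (by omega : ¬ r - 0 + 1 = L)]
    exact ih (fun q hq => hpos q (List.mem_cons_of_mem _ hq)) _ cnt

lemma pvAOuter_nonpos (count n : Int) (cs : List Char) (hc : count ≤ 0) :
    ∀ is : List Int, (∀ i ∈ is, 0 ≤ i) → ∀ cnt, pvAOuter count n cs is cnt = cnt := by
  intro is
  induction is with
  | nil => intro _ cnt; simp [pvAOuter]
  | cons i rest ih =>
    intro hpos cnt
    have hi : 0 ≤ i := hpos i (List.mem_cons_self)
    simp only [pvAOuter]
    by_cases hb : i * count > n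
    · rw [if_pos hb]
    · rw [if_neg hb]
      rw [pvAInner_nonpos (i * count) count cs (by exact mul_nonpos_iff.mpr (Or.inl ⟨hi, hc⟩)) _ ?_ _ cnt]
      · exact ih (fun q hq => hpos q (List.mem_cons_of_mem _ hq)) cnt
      · intro p hp
        obtain ⟨k, hk, rfl⟩ := (PySem.List.mem_enumerate_iff cs 0 p).mp hp
        simp

lemma outer_sync (count : Int) (hc : 1 ≤ count) (cs : List Char) :
    ∀ (m : Nat) (i0 : Int), 1 ≤ i0 → i0 + m = 27 → ∀ cnt,
      pvAOuter count (cs.length : Int) cs (PySem.List.pyRange i0 27 1) cnt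
        = (PySem.List.pyRange (i0 * count) (min (cs.length : Int) (26 * count) + 1) count).foldl
            (fun total L =>
              (pvBInner L count cs (PySem.List.pyRange 0 (cs.length : Int) 1)
                (PySem.Dict.empty, 0, total)).2.2) cnt := by
  intro m
  induction m with
  | zero =>
    intro i0 h1 h27 cnt
    have hi : i0 = 27 := by push_cast at h27; omega
    subst hi
    rw [PySem.List.pyRange_one_eq_nil (by omega)]
    rw [pyRange_pos_eq_nil (27 * count) (min (cs.length : Int) (26 * count) + 1) count (by omega)
      (by linarith [min_le_right (cs.length : Int) (26 * count)])]
    simp [pvAOuter]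
  | succ m ih =>
    intro i0 h1 h27 cnt
    rw [PySem.List.pyRange_one_cons (by omega)]
    simp only [pvAOuter]
    by_cases hb : i0 * count > (cs.length : Int)
    · rw [if_pos hb]
      rw [pyRange_pos_eq_nil (i0 * count) (min (cs.length : Int) (26 * count) + 1) count (by omega)
        (by linarith [min_le_left (cs.length : Int) (26 * count)])]
      simp
    · rw [if_neg hb]
      have hi26 : i0 ≤ 26 := by push_cast at h27; omega
      have hle26 : i0 * count ≤ 26 * count := mul_le_mul_of_nonneg_right hi26 (by omega)
      have hlb : i0 * count ≤ (cs.length : Int) := le_of_not_gt hb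
      have h1c : 1 ≤ i0 * count := by nlinarith
      have hlt : i0 * count < min (cs.length : Int) (26 * count) + 1 :=
        lt_of_le_of_lt (le_min hlb hle26) (lt_add_one _)
      rw [pyRange_pos_cons (i0 * count) (min (cs.length : Int) (26 * count) + 1) count (by omega) hlt]
      rw [List.foldl_cons]
      have hinner := inner_sync count (i0 * count) cs cs.length 0
        (by omega) PySem.Dict.empty 0 cnt (by simp [PySem.Dict.keys_empty])
        (by rw [pvBadN_empty]; rfl)
      simp only [List.drop_zero, Nat.cast_zero] at hinner
      have hmax0 : max 0 ((0 : Int) - i0 * count + 1) = 0 :=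
        max_eq_left (by omega)
      rw [hmax0] at hinner
      rw [hinner]
      have := ih (i0 + 1) (by omega) (by omega)
        ((pvBInner (i0 * count) count cs (PySem.List.pyRange 0 (cs.length : Int) 1)
          (PySem.Dict.empty, 0, cnt)).2.2)
      rw [show (i0 + 1) * count = i0 * count + count by ring] at this
      exact this

-- ===== VERDICT (by name: the statement is the Claim_ definition above) =====
theorem equalCountSubstrings_spec : Claim_equal_equalCountSubstrings := by
  intro s count _
  unfold Spec_equalCountSubstrings equalCountSubstrings equalCountSubstrings_alt
  by_cases hc : count ≤ 0
  · rw [if_pos hc]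
    apply pvAOuter_nonpos count _ _ hc
    intro i hi
    have := PySem.List.mem_pyRange_one.mp hi
    omega
  · rw [if_neg hc]
    have hc1 : 1 ≤ count := by omega
    have hlen : PySem.Str.len s = (s.toList.length : Int) := by simp [PySem.Str.len_eq]
    rw [hlen]
    have := outer_sync count hc1 s.toList 26 1 (by omega) (by omega) 0
    rw [show (1 : Int) * count = count by ring] at this
    exact this
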